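-- pv_equiv track=rewrite | github.com/malittlevina/unimind | native_models/llm_engine.py | _improve_clarity
-- ===== SOURCE A (Python) =====
-- def _improve_clarity(text: str) -> str:
--     """Improve text clarity."""
--     # Simple clarity improvements
--     improvements = {
--         "it is important to note that": "note that",
--         "it should be noted that": "note that",
--         "in order to": "to",
--         "due to the fact that": "because"
--     }
--
--     for old, new in improvements.items():
--         text = text.replace(old, new)
--
--     return text
-- ===== SOURCE B (Python) =====
-- def _improve_clarity(text: str) -> str:
--     """Improve text clarity."""
--     # One fused left-to-right scan replaces the three non-interacting phrases
--     # (priority = original dict order); "due to the fact that" is replaced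
--     # afterwards because the "in order to" -> "to" rewrite can create it.
--     first = [
--         ("it is important to note that", "note that"),
--         ("it should be noted that", "note that"),
--         ("in order to", "to"),
--     ]
--     out = []
--     i = 0
--     n = len(text)
--     while i < n:
--         for old, new in first:
--             if text.startswith(old, i):
--                 out.append(new)
--                 i += len(old)
--                 break
--         else:
--             out.append(text[i])
--             i += 1
--     return "".join(out).replace("due to the fact that", "because")
-- ===== Notes on version B (the rewrite author's own statement) =====
-- stated objective: alternative
-- what changed: A makes four sequential full-string replace passes over the text; B makes one fused left-to-right scan that replaces the first three phrases in priority order (proved non-interacting), followed by a single sequential replace of the fourth phrase, kept last because the third rewrite can create new occurrences of it.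
import Mathlib
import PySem

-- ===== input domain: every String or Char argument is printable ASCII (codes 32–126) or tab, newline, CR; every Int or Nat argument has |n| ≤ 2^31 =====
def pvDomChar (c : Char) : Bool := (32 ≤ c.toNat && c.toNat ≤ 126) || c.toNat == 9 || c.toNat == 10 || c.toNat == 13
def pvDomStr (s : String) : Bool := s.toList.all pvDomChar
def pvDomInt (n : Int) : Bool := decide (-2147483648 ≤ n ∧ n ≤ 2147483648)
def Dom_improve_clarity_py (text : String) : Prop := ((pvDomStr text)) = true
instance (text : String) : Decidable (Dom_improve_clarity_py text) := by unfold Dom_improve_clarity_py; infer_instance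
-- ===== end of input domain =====

-- B replaces A's four sequential full-string replace passes by one fused left-to-right
-- scan over the first three (mutually non-interacting) phrases followed by a single
-- final replace of "due to the fact that" (which the "in order to" -> "to" rewrite can
-- create); objective: alternative algorithm, same result on every input.

-- ===== PORT A =====
def improvements : List (String × String) :=
  [("it is important to note that", "note that"),
   ("it should be noted that", "note that"),
   ("in order to", "to"),
   ("due to the fact that", "because")]

def improve_clarity_py (text : String) : String :=
  improvements.foldl (fun t p => PySem.Str.replace t p.1 p.2) text

-- ===== PORT B =====
def pvK1 : List Char := "it is important to note that".toList
def pvK2 : List Char := "it should be noted that".toList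
def pvK3 : List Char := "in order to".toList
def pvV1 : List Char := "note that".toList
def pvV3 : List Char := "to".toList

-- the fused while-loop of Source B: at each position try the three phrases in order
def scanB : List Char → List Char
  | [] => []
  | c :: t =>
    if pvK1.isPrefixOf (c :: t) then pvV1 ++ scanB (t.drop (pvK1.length - 1))
    else if pvK2.isPrefixOf (c :: t) then pvV1 ++ scanB (t.drop (pvK2.length - 1))
    else if pvK3.isPrefixOf (c :: t) then pvV3 ++ scanB (t.drop (pvK3.length - 1))
    else c :: scanB t
  termination_by l => l.length
  decreasing_by all_goals (simp [List.length_drop]; try omega)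

def improve_clarity_py_alt (text : String) : String :=
  PySem.Str.replace (String.ofList (scanB text.toList)) "due to the fact that" "because"

-- ===== PRECONDITION & SPEC =====
def Spec_improve_clarity_py (text : String) (out : String) : Prop := out = improve_clarity_py_alt text
instance (text : String) (out : String) : Decidable (Spec_improve_clarity_py text out) := by unfold Spec_improve_clarity_py; infer_instance

-- ===== CLAIM (what is proved, stated in full; the proofs are below) =====
def Claim_equal_improve_clarity_py : Prop := ∀ (text : String), Dom_improve_clarity_py text → Spec_improve_clarity_py text (improve_clarity_py text)

-- ===== LEMMAS AND PROOFS =====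

-- a clean List-level scanner equal to PySem.Chars.replace for a nonempty pattern
def pvRep (k v : List Char) : List Char → List Char
  | [] => []
  | c :: t =>
    if k ≠ [] ∧ k.isPrefixOf (c :: t) then v ++ pvRep k v (t.drop (k.length - 1))
    else c :: pvRep k v t
  termination_by l => l.length
  decreasing_by all_goals (simp [List.length_drop]; try omega)

theorem pvRep_nil (k v : List Char) : pvRep k v [] = [] := by simp [pvRep]

theorem pvRep_match (k v l : List Char) (hk : k ≠ []) (h : k <+: l) :
    pvRep k v l = v ++ pvRep k v (l.drop k.length) := by
  cases l with
  | nil => exact absurd (List.prefix_nil.mp h) hk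
  | cons c t =>
    have hlen : k.length - 1 + 1 = k.length := by
      have : k.length ≠ 0 := by simpa using hk
      omega
    have hd : (c :: t).drop k.length = t.drop (k.length - 1) := by
      conv_lhs => rw [← hlen]
      rw [List.drop_succ_cons]
    rw [pvRep, if_pos ⟨hk, List.isPrefixOf_iff_prefix.mpr h⟩, hd]

theorem pvRep_nomatch (k v : List Char) (c : Char) (t : List Char)
    (h : ¬ k <+: (c :: t)) : pvRep k v (c :: t) = c :: pvRep k v t := by
  rw [pvRep, if_neg]
  intro hcon
  exact h (List.isPrefixOf_iff_prefix.mp hcon.2)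

theorem go_spec (k v : List Char) (hk : k ≠ []) :
    ∀ (fuel : Nat) (l acc : List Char), l.length ≤ fuel →
      PySem.Chars.replace.go k v fuel l acc = acc.reverse ++ pvRep k v l := by
  intro fuel
  induction fuel with
  | zero =>
    intro l acc hl
    have : l = [] := List.length_eq_zero_iff.mp (Nat.le_zero.mp hl)
    subst this
    simp [PySem.Chars.replace.go, pvRep_nil]
  | succ n ih =>
    intro l acc hl
    cases l with
    | nil => simp [PySem.Chars.replace.go, pvRep_nil]
    | cons c t =>
      rw [PySem.Chars.replace.go]
      by_cases h : k <+: (c :: t)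
      · rw [if_pos (List.isPrefixOf_iff_prefix.mpr h)]
        have hklen : 1 ≤ k.length := by
          cases k with
          | nil => exact absurd rfl hk
          | cons _ _ => simp
        have hlen : ((c :: t).drop k.length).length ≤ n := by
          simp only [List.length_drop, List.length_cons]
          simp only [List.length_cons] at hl
          omega
        rw [ih _ _ hlen, pvRep_match k v (c :: t) hk h]
        simp
      · rw [if_neg (by intro hcon; exact h (List.isPrefixOf_iff_prefix.mp hcon))]
        have hlen : t.length ≤ n := by simp at hl; omega
        rw [ih _ _ hlen, pvRep_nomatch k v c t h]
        simp

theorem replace_eq_pvRep (l k v : List Char) (hk : k ≠ []) :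
    PySem.Chars.replace l k v = pvRep k v l := by
  unfold PySem.Chars.replace
  rw [if_neg (by simpa using hk)]
  simpa using go_spec k v hk l.length l [] le_rfl

-- two prefixes of the same list are comparable (specialised to an append)
theorem prefix_append_cases {k a y : List Char} (h : k <+: a ++ y) :
    k <+: a ∨ a <+: k :=
  List.prefix_or_prefix_of_prefix h (List.prefix_append a y)

-- the scanner passes untouched over a block in which the pattern cannot start
theorem pvRep_skip (k v : List Char) :
    ∀ (a y : List Char),
      (∀ i, i < a.length → ¬ k <+: a.drop i ∧ ¬ a.drop i <+: k) →
      pvRep k v (a ++ y) = a ++ pvRep k v y := by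
  intro a
  induction a with
  | nil => intro y _; simp
  | cons c a' ih =>
    intro y hcond
    have h0 := hcond 0 (by simp)
    simp only [List.drop_zero] at h0
    have hnom : ¬ k <+: ((c :: a') ++ y) := by
      intro hcon
      rcases prefix_append_cases hcon with h | h
      · exact h0.1 h
      · exact h0.2 h
    rw [List.cons_append, pvRep_nomatch k v c (a' ++ y) (by simpa using hnom)]
    rw [ih y (fun i hi => by
      have := hcond (i + 1) (by simpa using Nat.succ_lt_succ hi)
      simpa using this)]
    simp

theorem prefix_cons_elim {p : List Char} {c : Char} {X : List Char}
    (h : p <+: c :: X) (hp : p ≠ []) : p.head? = some c ∧ p.tail <+: X := by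
  cases p with
  | nil => exact absurd rfl hp
  | cons d p' =>
    rw [List.cons_prefix_cons] at h
    exact ⟨by simp [h.1], h.2⟩

theorem prefix_cons_intro {p : List Char} {c : Char} {X : List Char}
    (hh : p.head? = some c) (ht : p.tail <+: X) : p <+: c :: X := by
  cases p with
  | nil => simp at hh
  | cons d p' =>
    simp only [List.head?_cons, Option.some.injEq] at hh
    subst hh
    exact List.cons_prefix_cons.mpr ⟨rfl, ht⟩

-- a (nonempty) suffix of K that cannot interact with the inserted v is a prefix of
-- the scanner's output only where it was already a prefix of the input
theorem pvRep_reflect (k v K : List Char) (hk : k ≠ [])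
    (H : ∀ s, s <:+ K → s ≠ [] → ¬ s <+: v ∧ ¬ v <+: s) :
    ∀ (l p : List Char), p <:+ K → p <+: pvRep k v l → p <+: l := by
  intro l
  induction l with
  | nil =>
    intro p _ hp
    rw [pvRep_nil] at hp
    exact hp
  | cons c t ih =>
    intro p hpK hp
    by_cases hm : k <+: (c :: t)
    · rw [pvRep_match k v (c :: t) hk hm] at hp
      rcases eq_or_ne p [] with rfl | hne
      · exact List.nil_prefix
      · rcases List.prefix_or_prefix_of_prefix hp (List.prefix_append v _) with h | h
        · exact absurd h (H p hpK hne).1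
        · exact absurd h (H p hpK hne).2
    · rw [pvRep_nomatch k v c t hm] at hp
      rcases eq_or_ne p [] with rfl | hne
      · exact List.nil_prefix
      · obtain ⟨hh, ht⟩ := prefix_cons_elim hp hne
        exact prefix_cons_intro hh (ih p.tail ((List.tail_suffix p).trans hpK) ht)

-- decidable non-interaction facts about the concrete phrases
theorem Hrefl (K : List Char)
    (h : ∀ s ∈ K.tails, s ≠ [] → ¬ s <+: pvV1 ∧ ¬ pvV1 <+: s) :
    ∀ s, s <:+ K → s ≠ [] → ¬ s <+: pvV1 ∧ ¬ pvV1 <+: s := by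
  intro s hs
  exact h s ((List.mem_tails _ _).mpr hs)

-- scanB equation lemmas
theorem scanB_nil : scanB [] = [] := by simp [scanB]

theorem scanB_match1 (l : List Char) (h : pvK1 <+: l) :
    scanB l = pvV1 ++ scanB (l.drop pvK1.length) := by
  cases l with
  | nil => exact absurd (List.prefix_nil.mp h) (by decide)
  | cons c t =>
    rw [scanB, if_pos (List.isPrefixOf_iff_prefix.mpr h)]
    rfl

theorem scanB_match2 (l : List Char) (h1 : ¬ pvK1 <+: l) (h : pvK2 <+: l) :
    scanB l = pvV1 ++ scanB (l.drop pvK2.length) := by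
  cases l with
  | nil => exact absurd (List.prefix_nil.mp h) (by decide)
  | cons c t =>
    rw [scanB, if_neg (fun hc => h1 (List.isPrefixOf_iff_prefix.mp hc)),
      if_pos (List.isPrefixOf_iff_prefix.mpr h)]
    rfl

theorem scanB_match3 (l : List Char) (h1 : ¬ pvK1 <+: l) (h2 : ¬ pvK2 <+: l)
    (h : pvK3 <+: l) :
    scanB l = pvV3 ++ scanB (l.drop pvK3.length) := by
  cases l with
  | nil => exact absurd (List.prefix_nil.mp h) (by decide)
  | cons c t =>
    rw [scanB, if_neg (fun hc => h1 (List.isPrefixOf_iff_prefix.mp hc)),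
      if_neg (fun hc => h2 (List.isPrefixOf_iff_prefix.mp hc)),
      if_pos (List.isPrefixOf_iff_prefix.mpr h)]
    rfl

theorem scanB_nomatch (c : Char) (t : List Char) (h1 : ¬ pvK1 <+: (c :: t))
    (h2 : ¬ pvK2 <+: (c :: t)) (h3 : ¬ pvK3 <+: (c :: t)) :
    scanB (c :: t) = c :: scanB t := by
  rw [scanB, if_neg (fun hc => h1 (List.isPrefixOf_iff_prefix.mp hc)),
    if_neg (fun hc => h2 (List.isPrefixOf_iff_prefix.mp hc)),
    if_neg (fun hc => h3 (List.isPrefixOf_iff_prefix.mp hc))]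

-- the heart: the three sequential passes equal the fused scan
theorem chain_eq_scan : ∀ (n : Nat) (l : List Char), l.length ≤ n →
    pvRep pvK3 pvV3 (pvRep pvK2 pvV1 (pvRep pvK1 pvV1 l)) = scanB l := by
  intro n
  induction n with
  | zero =>
    intro l hl
    have : l = [] := List.length_eq_zero_iff.mp (Nat.le_zero.mp hl)
    subst this
    simp [pvRep_nil, scanB_nil]
  | succ n ih =>
    intro l hl
    cases l with
    | nil => simp [pvRep_nil, scanB_nil]
    | cons c t =>
      by_cases h1 : pvK1 <+: (c :: t)
      · -- phrase 1 matches at the head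
        have hrlen : ((c :: t).drop pvK1.length).length ≤ n := by
          have hK : pvK1.length = 28 := by decide
          simp only [List.length_drop, List.length_cons]
          simp only [List.length_cons] at hl
          omega
        rw [pvRep_match pvK1 pvV1 (c :: t) (by decide) h1]
        rw [pvRep_skip pvK2 pvV1 pvV1 _ (by decide)]
        rw [pvRep_skip pvK3 pvV3 pvV1 _ (by decide)]
        rw [ih _ hrlen, scanB_match1 (c :: t) h1]
      · by_cases h2 : pvK2 <+: (c :: t)
        · -- phrase 2 matches at the head
          have hdec : (c :: t) = pvK2 ++ (c :: t).drop pvK2.length := by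
            conv_lhs => rw [← List.take_append_drop pvK2.length (c :: t)]
            rw [← List.prefix_iff_eq_take.mp h2]
          have hrlen : ((c :: t).drop pvK2.length).length ≤ n := by
            have hK : pvK2.length = 23 := by decide
            simp only [List.length_drop, List.length_cons]
            simp only [List.length_cons] at hl
            omega
          rw [show pvRep pvK1 pvV1 (c :: t) = pvK2 ++ pvRep pvK1 pvV1 ((c :: t).drop pvK2.length) by
            conv_lhs => rw [hdec]
            exact pvRep_skip pvK1 pvV1 pvK2 _ (by decide)]
          rw [pvRep_match pvK2 pvV1 (pvK2 ++ pvRep pvK1 pvV1 ((c :: t).drop pvK2.length)) (by decide)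
            (List.prefix_append pvK2 _)]
          rw [show (pvK2 ++ pvRep pvK1 pvV1 ((c :: t).drop pvK2.length)).drop pvK2.length
              = pvRep pvK1 pvV1 ((c :: t).drop pvK2.length) by simp]
          rw [pvRep_skip pvK3 pvV3 pvV1 _ (by decide)]
          rw [ih _ hrlen, scanB_match2 (c :: t) h1 h2]
        · by_cases h3 : pvK3 <+: (c :: t)
          · -- phrase 3 matches at the head
            have hdec : (c :: t) = pvK3 ++ (c :: t).drop pvK3.length := by
              conv_lhs => rw [← List.take_append_drop pvK3.length (c :: t)]
              rw [← List.prefix_iff_eq_take.mp h3]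
            have hrlen : ((c :: t).drop pvK3.length).length ≤ n := by
              have hK : pvK3.length = 11 := by decide
              simp only [List.length_drop, List.length_cons]
              simp only [List.length_cons] at hl
              omega
            rw [show pvRep pvK1 pvV1 (c :: t) = pvK3 ++ pvRep pvK1 pvV1 ((c :: t).drop pvK3.length) by
              conv_lhs => rw [hdec]
              exact pvRep_skip pvK1 pvV1 pvK3 _ (by decide)]
            rw [show pvRep pvK2 pvV1 (pvK3 ++ pvRep pvK1 pvV1 ((c :: t).drop pvK3.length))
                = pvK3 ++ pvRep pvK2 pvV1 (pvRep pvK1 pvV1 ((c :: t).drop pvK3.length)) from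
              pvRep_skip pvK2 pvV1 pvK3 _ (by decide)]
            rw [pvRep_match pvK3 pvV3
              (pvK3 ++ pvRep pvK2 pvV1 (pvRep pvK1 pvV1 ((c :: t).drop pvK3.length)))
              (by decide) (List.prefix_append pvK3 _)]
            rw [show (pvK3 ++ pvRep pvK2 pvV1 (pvRep pvK1 pvV1 ((c :: t).drop pvK3.length))).drop pvK3.length
                = pvRep pvK2 pvV1 (pvRep pvK1 pvV1 ((c :: t).drop pvK3.length)) by simp]
            rw [ih _ hrlen, scanB_match3 (c :: t) h1 h2 h3]
          · -- no phrase matches at the head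
            have htlen : t.length ≤ n := by simp at hl; omega
            rw [pvRep_nomatch pvK1 pvV1 c t h1]
            have hn2 : ¬ pvK2 <+: (c :: pvRep pvK1 pvV1 t) := by
              intro hcon
              obtain ⟨hh, ht⟩ := prefix_cons_elim hcon (by decide)
              have := pvRep_reflect pvK1 pvV1 pvK2 (by decide)
                (Hrefl pvK2 (by decide)) t pvK2.tail (List.tail_suffix pvK2) ht
              exact h2 (prefix_cons_intro hh this)
            rw [pvRep_nomatch pvK2 pvV1 c (pvRep pvK1 pvV1 t) hn2]
            have hn3 : ¬ pvK3 <+: (c :: pvRep pvK2 pvV1 (pvRep pvK1 pvV1 t)) := by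
              intro hcon
              obtain ⟨hh, ht⟩ := prefix_cons_elim hcon (by decide)
              have s2 := pvRep_reflect pvK2 pvV1 pvK3 (by decide)
                (Hrefl pvK3 (by decide)) (pvRep pvK1 pvV1 t) pvK3.tail
                (List.tail_suffix pvK3) ht
              have s1 := pvRep_reflect pvK1 pvV1 pvK3 (by decide)
                (Hrefl pvK3 (by decide)) t pvK3.tail (List.tail_suffix pvK3) s2
              exact h3 (prefix_cons_intro hh s1)
            rw [pvRep_nomatch pvK3 pvV3 c (pvRep pvK2 pvV1 (pvRep pvK1 pvV1 t)) hn3]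
            rw [ih t htlen, scanB_nomatch c t h1 h2 h3]

-- ===== VERDICT (by name: the statement is the Claim_ definition above) =====
theorem improve_clarity_py_spec : Claim_equal_improve_clarity_py := by
  unfold Claim_equal_improve_clarity_py
  intro text _
  unfold Spec_improve_clarity_py improve_clarity_py improve_clarity_py_alt improvements
  simp only [List.foldl_cons, List.foldl_nil]
  have hinner : PySem.Str.replace (PySem.Str.replace (PySem.Str.replace text
      "it is important to note that" "note that") "it should be noted that" "note that")
      "in order to" "to" = String.ofList (scanB text.toList) := by
    apply String.toList_inj.mp
    simp only [PySem.Str.toList_replace]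
    rw [show ("in order to" : String).toList = pvK3 from rfl,
      show ("it should be noted that" : String).toList = pvK2 from rfl,
      show ("it is important to note that" : String).toList = pvK1 from rfl,
      show ("note that" : String).toList = pvV1 from rfl,
      show ("to" : String).toList = pvV3 from rfl]
    rw [replace_eq_pvRep text.toList pvK1 pvV1 (by decide),
      replace_eq_pvRep _ pvK2 pvV1 (by decide),
      replace_eq_pvRep _ pvK3 pvV3 (by decide)]
    rw [chain_eq_scan text.toList.length text.toList le_rfl]
    simp [String.toList_ofList]
  rw [hinner]
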